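-- pv_equiv track=rewrite | github.com/NISOx-BDI/nisox.org | bibble/bibble.py | _author_Shorten
-- ===== SOURCE A (Python) =====
-- def _author_Shorten(authorList):
--     #This function takes in a list of authors and if there are more than 6, outputs the first 6 authors and et al.
--
--     if authorList.count(',') < 6:
--         shortenedAuthorList = authorList
--     else:
--         commaCount = 0
--         currentLetter = 0
--         shortened = False
--
--         while(shortened == False):
--             #Count the number of commas.
--             if authorList[currentLetter] == ',':
--                 commaCount = commaCount +1
--             #Move onto next letter.
--             currentLetter = currentLetter + 1
--             #If we have 6 author names (and therefore 6 commas) change the remaining names to et al.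
--             if commaCount == 6:
--                 shortenedAuthorList = authorList[0:(currentLetter)]+' et al'
--                 shortened = True
--
--     return shortenedAuthorList
-- ===== SOURCE B (Python) =====
-- def _author_Shorten(authorList):
--     # Split into comma-separated fields, keep the first 6, rejoin, append the et-al suffix.
--     if authorList.count(',') < 6:
--         return authorList
--     parts = authorList.split(',')
--     return ','.join(parts[:6]) + ', et al'
-- ===== Notes on version B (the rewrite author's own statement) =====
-- stated objective: simpler
-- what changed: Replaced the character-by-character comma-counting while-loop (with manual index, counter and flag variables) by split-on-comma, take the first 6 fields, rejoin and append the et-al suffix.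
import Mathlib
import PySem

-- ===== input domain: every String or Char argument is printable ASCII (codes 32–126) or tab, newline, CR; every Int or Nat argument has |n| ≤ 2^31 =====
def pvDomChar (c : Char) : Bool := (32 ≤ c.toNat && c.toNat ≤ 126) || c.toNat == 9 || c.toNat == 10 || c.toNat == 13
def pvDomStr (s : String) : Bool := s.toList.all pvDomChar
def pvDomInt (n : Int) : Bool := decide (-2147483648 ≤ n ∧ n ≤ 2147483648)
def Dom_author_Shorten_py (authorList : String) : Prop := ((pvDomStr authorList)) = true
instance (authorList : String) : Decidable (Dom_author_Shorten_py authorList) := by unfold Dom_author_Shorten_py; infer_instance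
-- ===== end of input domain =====

-- B rewrites A's character-by-character comma-counting while-loop as split/take-6/rejoin with the et-al suffix appended (objective: simpler).

-- ===== PORT A =====
-- A's while loop: scan characters, counting commas; on the 6th comma return the consumed
-- prefix authorList[0:currentLetter] (held here as 'acc', reversed) plus ' et al'.
-- The [] case is Python's IndexError, unreachable under the guard count(',') ≥ 6.
def aShortenLoop : List Char → List Char → Nat → String
  | [], acc, _ => String.ofList acc.reverse
  | c :: rest, acc, commaCount =>
      let commaCount' := if c = ',' then commaCount + 1 else commaCount
      if commaCount' = 6 then String.ofList ((c :: acc).reverse ++ " et al".toList)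
      else aShortenLoop rest (c :: acc) commaCount'

def author_Shorten_py (authorList : String) : String :=
  if PySem.Str.count authorList "," < 6 then authorList
  else aShortenLoop authorList.toList [] 0

-- ===== PORT B =====
def author_Shorten_py_alt (authorList : String) : String :=
  if PySem.Str.count authorList "," < 6 then authorList
  else
    match PySem.Str.split? authorList "," with
    | some parts => PySem.Str.join "," (PySem.List.slice parts none (some 6)) ++ ", et al"
    | none => authorList   -- unreachable: the separator "," is non-empty

-- ===== PRECONDITION & SPEC =====
def Spec_author_Shorten_py (authorList : String) (out : String) : Prop := out = author_Shorten_py_alt authorList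
instance (authorList : String) (out : String) : Decidable (Spec_author_Shorten_py authorList out) := by unfold Spec_author_Shorten_py; infer_instance

-- ===== CLAIM (what is proved, stated in full; the proofs are below) =====
def Claim_equal_author_Shorten_py : Prop := ∀ (authorList : String), Dom_author_Shorten_py authorList → Spec_author_Shorten_py authorList (author_Shorten_py authorList)

-- ===== LEMMAS AND PROOFS =====

-- the prefix of cs up to and including its k-th comma (k ≥ 1)
def uptoComma : Nat → List Char → List Char
  | _, [] => []
  | k, c :: rest =>
      if c = ',' then (if k = 1 then [c] else c :: uptoComma (k - 1) rest)
      else c :: uptoComma k rest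

-- Python split(',') as a simple structural recursion ('cur' = current field, reversed)
def splitComma : List Char → List Char → List (List Char)
  | [], cur => [cur.reverse]
  | c :: rest, cur => if c = ',' then cur.reverse :: splitComma rest [] else splitComma rest (c :: cur)

theorem splitComma_cons_comma (rest cur : List Char) :
    splitComma (',' :: rest) cur = cur.reverse :: splitComma rest [] := by
  simp [splitComma]

theorem splitComma_cons_ne (c : Char) (rest cur : List Char) (hc : ¬ c = ',') :
    splitComma (c :: rest) cur = splitComma rest (c :: cur) := by
  simp [splitComma, hc]

theorem uptoComma_cons_comma (k : Nat) (rest : List Char) :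
    uptoComma k (',' :: rest) = if k = 1 then [','] else ',' :: uptoComma (k - 1) rest := by
  simp [uptoComma]

theorem uptoComma_cons_ne (k : Nat) (c : Char) (rest : List Char) (hc : ¬ c = ',') :
    uptoComma k (c :: rest) = c :: uptoComma k rest := by
  simp [uptoComma, hc]

theorem countGo_comma (cs : List Char) : ∀ (fuel acc : Nat), cs.length ≤ fuel →
    PySem.Chars.count.go [','] fuel cs acc = acc + cs.count ',' := by
  induction cs with
  | nil => intro fuel acc h; cases fuel <;> simp [PySem.Chars.count.go]
  | cons c rest ih =>
    intro fuel acc h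
    cases fuel with
    | zero => simp at h
    | succ n =>
      by_cases hc : c = ','
      · subst hc
        simp [PySem.Chars.count.go, List.isPrefixOf, ih n (acc + 1) (by simpa using h)]
        omega
      · have hc' : ¬ (',' = c) := fun h' => hc h'.symm
        simp [PySem.Chars.count.go, List.isPrefixOf, hc', ih n acc (by simpa using h), hc]

theorem count_comma (cs : List Char) : PySem.Chars.count cs [','] = cs.count ',' := by
  simp [PySem.Chars.count, countGo_comma cs cs.length 0 (le_refl _)]

theorem splitOnGo_comma (cs : List Char) : ∀ (fuel : Nat) (cur : List Char) (acc : List (List Char)),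
    cs.length < fuel →
    PySem.Chars.splitOn.go [','] fuel cs cur acc = acc.reverse ++ splitComma cs cur := by
  induction cs with
  | nil => intro fuel cur acc h; cases fuel with
    | zero => simp at h
    | succ n => simp [PySem.Chars.splitOn.go, splitComma]
  | cons c rest ih =>
    intro fuel cur acc h
    cases fuel with
    | zero => simp at h
    | succ n =>
      by_cases hc : c = ','
      · subst hc
        rw [splitComma_cons_comma]
        simp [PySem.Chars.splitOn.go, List.isPrefixOf,
          ih n [] (cur.reverse :: acc) (by simpa using h)]
      · have hc' : ¬ (',' = c) := fun h' => hc h'.symm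
        rw [splitComma_cons_ne c rest cur hc]
        simp [PySem.Chars.splitOn.go, List.isPrefixOf, hc',
          ih n (c :: cur) acc (by simp at h; omega)]

theorem splitOn_comma (cs : List Char) : PySem.Chars.splitOn cs [','] = splitComma cs [] := by
  simp [PySem.Chars.splitOn, splitOnGo_comma cs (cs.length + 1) [] [] (by omega)]

theorem splitComma_ne_nil (cs cur : List Char) : splitComma cs cur ≠ [] := by
  induction cs generalizing cur with
  | nil => simp [splitComma]
  | cons c rest ih => by_cases hc : c = ',' <;> simp [splitComma, hc, ih]

theorem join_take_comma (cs : List Char) : ∀ (cur : List Char) (k : Nat), 1 ≤ k → k ≤ cs.count ',' →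
    PySem.Chars.join [','] ((splitComma cs cur).take k) ++ [','] = cur.reverse ++ uptoComma k cs := by
  induction cs with
  | nil => intro cur k h1 h2; simp at h2; omega
  | cons c rest ih =>
    intro cur k h1 h2
    by_cases hc : c = ','
    · subst hc
      obtain ⟨m, rfl⟩ : ∃ m, k = m + 1 := ⟨k - 1, by omega⟩
      rw [splitComma_cons_comma, uptoComma_cons_comma, List.take_succ_cons]
      by_cases hm : m = 0
      · subst hm
        simp [PySem.Chars.join_singleton]
      · have hm1 : 1 ≤ m := by omega
        have hcnt : m ≤ rest.count ',' := by
          have hcc : (',' :: rest).count ',' = rest.count ',' + 1 := by simp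
          omega
        have hih := ih [] m hm1 hcnt
        simp only [List.reverse_nil, List.nil_append] at hih
        cases hsp : (splitComma rest []).take m with
        | nil =>
          rcases List.take_eq_nil_iff.mp hsp with h0 | h0
          · omega
          · exact absurd h0 (splitComma_ne_nil rest [])
        | cons a l =>
          rw [hsp] at hih
          rw [PySem.Chars.join_cons_cons, if_neg (show ¬ m + 1 = 1 by omega)]
          simp only [List.append_assoc]
          rw [hih]
          simp
    · have hcnt : k ≤ rest.count ',' := by simpa [List.count_cons, hc] using h2
      rw [splitComma_cons_ne c rest cur hc, uptoComma_cons_ne k c rest hc,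
        ih (c :: cur) k h1 hcnt]
      simp

theorem aLoop_spec (cs : List Char) : ∀ (acc : List Char) (cnt : Nat), cnt < 6 →
    6 - cnt ≤ cs.count ',' →
    aShortenLoop cs acc cnt = String.ofList (acc.reverse ++ uptoComma (6 - cnt) cs ++ " et al".toList) := by
  induction cs with
  | nil => intro acc cnt h1 h2; simp at h2; omega
  | cons c rest ih =>
    intro acc cnt h1 h2
    by_cases hc : c = ','
    · subst hc
      rw [uptoComma_cons_comma]
      by_cases h6 : cnt + 1 = 6
      · rw [if_pos (show 6 - cnt = 1 by omega)]
        simp [aShortenLoop, h6]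
      · have hlt : cnt + 1 < 6 := by omega
        have hcnt : 6 - (cnt + 1) ≤ rest.count ',' := by
          simp at h2; omega
        rw [if_neg (show ¬ 6 - cnt = 1 by omega)]
        have hstep : aShortenLoop (',' :: rest) acc cnt = aShortenLoop rest (',' :: acc) (cnt + 1) := by
          simp [aShortenLoop, h6]
        rw [hstep, ih (',' :: acc) (cnt + 1) hlt hcnt]
        simp [show 6 - (cnt + 1) = 6 - cnt - 1 by omega]
    · have hcnt : 6 - cnt ≤ rest.count ',' := by simpa [List.count_cons, hc] using h2
      rw [uptoComma_cons_ne _ c rest hc]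
      have h6 : ¬ cnt = 6 := by omega
      have hstep : aShortenLoop (c :: rest) acc cnt = aShortenLoop rest (c :: acc) cnt := by
        simp [aShortenLoop, hc, h6]
      rw [hstep, ih (c :: acc) cnt h1 hcnt]
      simp

-- ===== VERDICT (by name: the statement is the Claim_ definition above) =====
theorem author_Shorten_py_spec : Claim_equal_author_Shorten_py := by
  unfold Claim_equal_author_Shorten_py
  intro s _
  unfold Spec_author_Shorten_py author_Shorten_py author_Shorten_py_alt
  have hcount : PySem.Str.count s "," = s.toList.count ',' := by
    rw [PySem.Str.count_eq]; exact count_comma s.toList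
  by_cases h : PySem.Str.count s "," < 6
  · rw [if_pos h, if_pos h]
  · rw [if_neg h, if_neg h]
    have h6 : 6 ≤ s.toList.count ',' := by omega
    have hsplit : PySem.Str.split? s "," = some ((splitComma s.toList []).map String.ofList) := by
      simp [PySem.Str.split?, PySem.Chars.split?, splitOn_comma]
    have hB : (match PySem.Str.split? s "," with
        | some parts => PySem.Str.join "," (PySem.List.slice parts none (some 6)) ++ ", et al"
        | none => s)
        = PySem.Str.join "," (PySem.List.slice ((splitComma s.toList []).map String.ofList) none (some 6)) ++ ", et al" := by
      rw [hsplit]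
    rw [hB]
    apply String.toList_inj.mp
    rw [aLoop_spec s.toList [] 0 (by omega) (by omega)]
    rw [PySem.List.slice_to _ (by norm_num), String.toList_append, PySem.Str.toList_join]
    have hmap : ((((splitComma s.toList []).map String.ofList).take (6 : Int).toNat).map String.toList)
        = (splitComma s.toList []).take 6 := by
      rw [List.map_take, List.map_map]
      simp [Function.comp_def]
    rw [hmap]
    have hj := join_take_comma s.toList [] 6 (by omega) h6
    simp only [List.reverse_nil, List.nil_append] at hj
    have hcomma : (", et al").toList = [','] ++ (" et al").toList := by decide
    rw [show (",").toList = [','] from by decide, hcomma, ← List.append_assoc, hj]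
    simp
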